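-- pv_equiv track=rewrite | github.com/Gamufal/PlaybackStylophone | stylophone_final.py | get_note_index
-- ===== SOURCE A (Python) =====
-- adc_thresholds = [4500, 9000, 13000, 17000, 20000, 24000, 29000, 34000, 39000, 46000, 54000, 64000]
--
-- def get_note_index(adc_val):
--     idx = -1
--     for i in range(len(adc_thresholds)):
--         if adc_val >= adc_thresholds[i]:
--             idx = i
--         else:
--             break
--     return idx if idx != -1 else None
-- ===== SOURCE B (Python) =====
-- import bisect
--
-- adc_thresholds = [4500, 9000, 13000, 17000, 20000, 24000, 29000, 34000, 39000, 46000, 54000, 64000]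
--
-- def get_note_index(adc_val):
--     idx = bisect.bisect_right(adc_thresholds, adc_val) - 1
--     return None if idx < 0 else idx
-- ===== Notes on version B (the rewrite author's own statement) =====
-- stated objective: idiomatic
-- what changed: Replaced the sequential scan-with-break over the threshold list by bisect.bisect_right binary search, returning the count of thresholds <= adc_val minus one.
import Mathlib
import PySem

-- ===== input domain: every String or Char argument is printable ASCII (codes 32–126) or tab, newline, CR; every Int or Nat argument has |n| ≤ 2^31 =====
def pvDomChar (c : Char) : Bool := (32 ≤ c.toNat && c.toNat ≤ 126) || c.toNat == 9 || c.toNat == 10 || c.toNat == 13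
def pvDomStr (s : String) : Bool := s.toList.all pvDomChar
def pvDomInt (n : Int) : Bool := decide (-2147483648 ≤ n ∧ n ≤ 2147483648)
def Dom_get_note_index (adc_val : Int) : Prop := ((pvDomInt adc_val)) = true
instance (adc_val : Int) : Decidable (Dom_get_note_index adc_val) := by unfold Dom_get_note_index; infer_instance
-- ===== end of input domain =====

-- B replaces A's linear scan-with-break by bisect_right binary search (idiomatic; same results).

-- ===== PORT A =====
def adc_thresholds : List Int := [4500, 9000, 13000, 17000, 20000, 24000, 29000, 34000, 39000, 46000, 54000, 64000]

-- the for-loop over range(len(adc_thresholds)) with break, carrying idx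
def pvLoopA (adc_val : Int) : List (Int × Int) → Int → Int
  | [], idx => idx
  | (i, t) :: rest, idx => if adc_val ≥ t then pvLoopA adc_val rest i else idx

def get_note_index (adc_val : Int) : Option Int :=
  let idx := pvLoopA adc_val (PySem.List.enumerate adc_thresholds) (-1)
  if idx ≠ -1 then some idx else none

-- ===== PORT B =====
-- bisect.bisect_right(xs, x) between lo and hi, transliterated
def pvBisectRight (xs : List Int) (x : Int) (lo hi : Nat) : Nat :=
  if _h : lo < hi then
    let mid := (lo + hi) / 2
    if x < xs.getD mid 0 then pvBisectRight xs x lo mid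
    else pvBisectRight xs x (mid + 1) hi
  else lo
termination_by hi - lo
decreasing_by all_goals omega

def get_note_index_alt (adc_val : Int) : Option Int :=
  let idx : Int := (pvBisectRight adc_thresholds adc_val 0 adc_thresholds.length : Int) - 1
  if idx < 0 then none else some idx

-- ===== PRECONDITION & SPEC =====
def Spec_get_note_index (adc_val : Int) (out : Option Int) : Prop := out = get_note_index_alt adc_val
instance (adc_val : Int) (out : Option Int) : Decidable (Spec_get_note_index adc_val out) := by unfold Spec_get_note_index; infer_instance

-- ===== CLAIM (what is proved, stated in full; the proofs are below) =====
def Claim_equal_get_note_index : Prop := ∀ (adc_val : Int), Dom_get_note_index adc_val → Spec_get_note_index adc_val (get_note_index adc_val)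

-- ===== LEMMAS AND PROOFS =====

-- ===== VERDICT (by name: the statement is the Claim_ definition above) =====
set_option maxRecDepth 8000 in
theorem get_note_index_spec : Claim_equal_get_note_index := by
  intro a _
  unfold Spec_get_note_index get_note_index get_note_index_alt
  by_cases h0 : a < 4500
  · simp [pvBisectRight, pvLoopA, adc_thresholds, PySem.List.enumerate, List.getD, show a < 4500 by omega, show ¬ a ≥ 4500 by omega, show a < 9000 by omega, show ¬ a ≥ 9000 by omega, show a < 13000 by omega, show ¬ a ≥ 13000 by omega, show a < 17000 by omega, show ¬ a ≥ 17000 by omega, show a < 20000 by omega, show ¬ a ≥ 20000 by omega, show a < 24000 by omega, show ¬ a ≥ 24000 by omega, show a < 29000 by omega, show ¬ a ≥ 29000 by omega, show a < 34000 by omega, show ¬ a ≥ 34000 by omega, show a < 39000 by omega, show ¬ a ≥ 39000 by omega, show a < 46000 by omega, show ¬ a ≥ 46000 by omega, show a < 54000 by omega, show ¬ a ≥ 54000 by omega, show a < 64000 by omega, show ¬ a ≥ 64000 by omega]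
  by_cases h1 : a < 9000
  · simp [pvBisectRight, pvLoopA, adc_thresholds, PySem.List.enumerate, List.getD, show ¬ a < 4500 by omega, show a ≥ 4500 by omega, show a < 9000 by omega, show ¬ a ≥ 9000 by omega, show a < 13000 by omega, show ¬ a ≥ 13000 by omega, show a < 17000 by omega, show ¬ a ≥ 17000 by omega, show a < 20000 by omega, show ¬ a ≥ 20000 by omega, show a < 24000 by omega, show ¬ a ≥ 24000 by omega, show a < 29000 by omega, show ¬ a ≥ 29000 by omega, show a < 34000 by omega, show ¬ a ≥ 34000 by omega, show a < 39000 by omega, show ¬ a ≥ 39000 by omega, show a < 46000 by omega, show ¬ a ≥ 46000 by omega, show a < 54000 by omega, show ¬ a ≥ 54000 by omega, show a < 64000 by omega, show ¬ a ≥ 64000 by omega]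
  by_cases h2 : a < 13000
  · simp [pvBisectRight, pvLoopA, adc_thresholds, PySem.List.enumerate, List.getD, show ¬ a < 4500 by omega, show a ≥ 4500 by omega, show ¬ a < 9000 by omega, show a ≥ 9000 by omega, show a < 13000 by omega, show ¬ a ≥ 13000 by omega, show a < 17000 by omega, show ¬ a ≥ 17000 by omega, show a < 20000 by omega, show ¬ a ≥ 20000 by omega, show a < 24000 by omega, show ¬ a ≥ 24000 by omega, show a < 29000 by omega, show ¬ a ≥ 29000 by omega, show a < 34000 by omega, show ¬ a ≥ 34000 by omega, show a < 39000 by omega, show ¬ a ≥ 39000 by omega, show a < 46000 by omega, show ¬ a ≥ 46000 by omega, show a < 54000 by omega, show ¬ a ≥ 54000 by omega, show a < 64000 by omega, show ¬ a ≥ 64000 by omega]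
  by_cases h3 : a < 17000
  · simp [pvBisectRight, pvLoopA, adc_thresholds, PySem.List.enumerate, List.getD, show ¬ a < 4500 by omega, show a ≥ 4500 by omega, show ¬ a < 9000 by omega, show a ≥ 9000 by omega, show ¬ a < 13000 by omega, show a ≥ 13000 by omega, show a < 17000 by omega, show ¬ a ≥ 17000 by omega, show a < 20000 by omega, show ¬ a ≥ 20000 by omega, show a < 24000 by omega, show ¬ a ≥ 24000 by omega, show a < 29000 by omega, show ¬ a ≥ 29000 by omega, show a < 34000 by omega, show ¬ a ≥ 34000 by omega, show a < 39000 by omega, show ¬ a ≥ 39000 by omega, show a < 46000 by omega, show ¬ a ≥ 46000 by omega, show a < 54000 by omega, show ¬ a ≥ 54000 by omega, show a < 64000 by omega, show ¬ a ≥ 64000 by omega]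
  by_cases h4 : a < 20000
  · simp [pvBisectRight, pvLoopA, adc_thresholds, PySem.List.enumerate, List.getD, show ¬ a < 4500 by omega, show a ≥ 4500 by omega, show ¬ a < 9000 by omega, show a ≥ 9000 by omega, show ¬ a < 13000 by omega, show a ≥ 13000 by omega, show ¬ a < 17000 by omega, show a ≥ 17000 by omega, show a < 20000 by omega, show ¬ a ≥ 20000 by omega, show a < 24000 by omega, show ¬ a ≥ 24000 by omega, show a < 29000 by omega, show ¬ a ≥ 29000 by omega, show a < 34000 by omega, show ¬ a ≥ 34000 by omega, show a < 39000 by omega, show ¬ a ≥ 39000 by omega, show a < 46000 by omega, show ¬ a ≥ 46000 by omega, show a < 54000 by omega, show ¬ a ≥ 54000 by omega, show a < 64000 by omega, show ¬ a ≥ 64000 by omega]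
  by_cases h5 : a < 24000
  · simp [pvBisectRight, pvLoopA, adc_thresholds, PySem.List.enumerate, List.getD, show ¬ a < 4500 by omega, show a ≥ 4500 by omega, show ¬ a < 9000 by omega, show a ≥ 9000 by omega, show ¬ a < 13000 by omega, show a ≥ 13000 by omega, show ¬ a < 17000 by omega, show a ≥ 17000 by omega, show ¬ a < 20000 by omega, show a ≥ 20000 by omega, show a < 24000 by omega, show ¬ a ≥ 24000 by omega, show a < 29000 by omega, show ¬ a ≥ 29000 by omega, show a < 34000 by omega, show ¬ a ≥ 34000 by omega, show a < 39000 by omega, show ¬ a ≥ 39000 by omega, show a < 46000 by omega, show ¬ a ≥ 46000 by omega, show a < 54000 by omega, show ¬ a ≥ 54000 by omega, show a < 64000 by omega, show ¬ a ≥ 64000 by omega]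
  by_cases h6 : a < 29000
  · simp [pvBisectRight, pvLoopA, adc_thresholds, PySem.List.enumerate, List.getD, show ¬ a < 4500 by omega, show a ≥ 4500 by omega, show ¬ a < 9000 by omega, show a ≥ 9000 by omega, show ¬ a < 13000 by omega, show a ≥ 13000 by omega, show ¬ a < 17000 by omega, show a ≥ 17000 by omega, show ¬ a < 20000 by omega, show a ≥ 20000 by omega, show ¬ a < 24000 by omega, show a ≥ 24000 by omega, show a < 29000 by omega, show ¬ a ≥ 29000 by omega, show a < 34000 by omega, show ¬ a ≥ 34000 by omega, show a < 39000 by omega, show ¬ a ≥ 39000 by omega, show a < 46000 by omega, show ¬ a ≥ 46000 by omega, show a < 54000 by omega, show ¬ a ≥ 54000 by omega, show a < 64000 by omega, show ¬ a ≥ 64000 by omega]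
  by_cases h7 : a < 34000
  · simp [pvBisectRight, pvLoopA, adc_thresholds, PySem.List.enumerate, List.getD, show ¬ a < 4500 by omega, show a ≥ 4500 by omega, show ¬ a < 9000 by omega, show a ≥ 9000 by omega, show ¬ a < 13000 by omega, show a ≥ 13000 by omega, show ¬ a < 17000 by omega, show a ≥ 17000 by omega, show ¬ a < 20000 by omega, show a ≥ 20000 by omega, show ¬ a < 24000 by omega, show a ≥ 24000 by omega, show ¬ a < 29000 by omega, show a ≥ 29000 by omega, show a < 34000 by omega, show ¬ a ≥ 34000 by omega, show a < 39000 by omega, show ¬ a ≥ 39000 by omega, show a < 46000 by omega, show ¬ a ≥ 46000 by omega, show a < 54000 by omega, show ¬ a ≥ 54000 by omega, show a < 64000 by omega, show ¬ a ≥ 64000 by omega]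
  by_cases h8 : a < 39000
  · simp [pvBisectRight, pvLoopA, adc_thresholds, PySem.List.enumerate, List.getD, show ¬ a < 4500 by omega, show a ≥ 4500 by omega, show ¬ a < 9000 by omega, show a ≥ 9000 by omega, show ¬ a < 13000 by omega, show a ≥ 13000 by omega, show ¬ a < 17000 by omega, show a ≥ 17000 by omega, show ¬ a < 20000 by omega, show a ≥ 20000 by omega, show ¬ a < 24000 by omega, show a ≥ 24000 by omega, show ¬ a < 29000 by omega, show a ≥ 29000 by omega, show ¬ a < 34000 by omega, show a ≥ 34000 by omega, show a < 39000 by omega, show ¬ a ≥ 39000 by omega, show a < 46000 by omega, show ¬ a ≥ 46000 by omega, show a < 54000 by omega, show ¬ a ≥ 54000 by omega, show a < 64000 by omega, show ¬ a ≥ 64000 by omega]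
  by_cases h9 : a < 46000
  · simp [pvBisectRight, pvLoopA, adc_thresholds, PySem.List.enumerate, List.getD, show ¬ a < 4500 by omega, show a ≥ 4500 by omega, show ¬ a < 9000 by omega, show a ≥ 9000 by omega, show ¬ a < 13000 by omega, show a ≥ 13000 by omega, show ¬ a < 17000 by omega, show a ≥ 17000 by omega, show ¬ a < 20000 by omega, show a ≥ 20000 by omega, show ¬ a < 24000 by omega, show a ≥ 24000 by omega, show ¬ a < 29000 by omega, show a ≥ 29000 by omega, show ¬ a < 34000 by omega, show a ≥ 34000 by omega, show ¬ a < 39000 by omega, show a ≥ 39000 by omega, show a < 46000 by omega, show ¬ a ≥ 46000 by omega, show a < 54000 by omega, show ¬ a ≥ 54000 by omega, show a < 64000 by omega, show ¬ a ≥ 64000 by omega]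
  by_cases h10 : a < 54000
  · simp [pvBisectRight, pvLoopA, adc_thresholds, PySem.List.enumerate, List.getD, show ¬ a < 4500 by omega, show a ≥ 4500 by omega, show ¬ a < 9000 by omega, show a ≥ 9000 by omega, show ¬ a < 13000 by omega, show a ≥ 13000 by omega, show ¬ a < 17000 by omega, show a ≥ 17000 by omega, show ¬ a < 20000 by omega, show a ≥ 20000 by omega, show ¬ a < 24000 by omega, show a ≥ 24000 by omega, show ¬ a < 29000 by omega, show a ≥ 29000 by omega, show ¬ a < 34000 by omega, show a ≥ 34000 by omega, show ¬ a < 39000 by omega, show a ≥ 39000 by omega, show ¬ a < 46000 by omega, show a ≥ 46000 by omega, show a < 54000 by omega, show ¬ a ≥ 54000 by omega, show a < 64000 by omega, show ¬ a ≥ 64000 by omega]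
  by_cases h11 : a < 64000
  · simp [pvBisectRight, pvLoopA, adc_thresholds, PySem.List.enumerate, List.getD, show ¬ a < 4500 by omega, show a ≥ 4500 by omega, show ¬ a < 9000 by omega, show a ≥ 9000 by omega, show ¬ a < 13000 by omega, show a ≥ 13000 by omega, show ¬ a < 17000 by omega, show a ≥ 17000 by omega, show ¬ a < 20000 by omega, show a ≥ 20000 by omega, show ¬ a < 24000 by omega, show a ≥ 24000 by omega, show ¬ a < 29000 by omega, show a ≥ 29000 by omega, show ¬ a < 34000 by omega, show a ≥ 34000 by omega, show ¬ a < 39000 by omega, show a ≥ 39000 by omega, show ¬ a < 46000 by omega, show a ≥ 46000 by omega, show ¬ a < 54000 by omega, show a ≥ 54000 by omega, show a < 64000 by omega, show ¬ a ≥ 64000 by omega]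
  simp [pvBisectRight, pvLoopA, adc_thresholds, PySem.List.enumerate, List.getD, show ¬ a < 4500 by omega, show a ≥ 4500 by omega, show ¬ a < 9000 by omega, show a ≥ 9000 by omega, show ¬ a < 13000 by omega, show a ≥ 13000 by omega, show ¬ a < 17000 by omega, show a ≥ 17000 by omega, show ¬ a < 20000 by omega, show a ≥ 20000 by omega, show ¬ a < 24000 by omega, show a ≥ 24000 by omega, show ¬ a < 29000 by omega, show a ≥ 29000 by omega, show ¬ a < 34000 by omega, show a ≥ 34000 by omega, show ¬ a < 39000 by omega, show a ≥ 39000 by omega, show ¬ a < 46000 by omega, show a ≥ 46000 by omega, show ¬ a < 54000 by omega, show a ≥ 54000 by omega, show ¬ a < 64000 by omega, show a ≥ 64000 by omega]
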